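-- pv_equiv track=rewrite | github.com/JJohnson-DA/aoc-23 | src/d13.py | check_top
-- ===== SOURCE A (Python) =====
-- def check_top(l):
--     sym_max = 0
--     for i in range(0, len(l)):
--         # Find symmetry from top
--         top = l[:i][::-1]
--         bottom = l[i : len(top) + i]
--         if top == bottom:
--             sym_max = max(sym_max, i)
--     return sym_max
-- ===== SOURCE B (Python) =====
-- def check_top(l):
--     # Descend from the largest feasible mirror line and return the first
--     # (hence largest) index whose reversed prefix matches the block below it,
--     # compared element by element with early exit.
--     i = len(l) // 2
--     while i > 0:
--         if all(l[i - 1 - k] == l[i + k] for k in range(i)):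
--             return i
--         i -= 1
--     return 0
-- ===== Notes on version B (the rewrite author's own statement) =====
-- stated objective: alternative
-- what changed: A builds and compares two list slices (a reversed copy of the prefix) for every i ascending and accumulates the max; B searches descending from len(l)//2, tests each candidate mirror line element by element with an early-exit all(), and returns the first hit.
import Mathlib
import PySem

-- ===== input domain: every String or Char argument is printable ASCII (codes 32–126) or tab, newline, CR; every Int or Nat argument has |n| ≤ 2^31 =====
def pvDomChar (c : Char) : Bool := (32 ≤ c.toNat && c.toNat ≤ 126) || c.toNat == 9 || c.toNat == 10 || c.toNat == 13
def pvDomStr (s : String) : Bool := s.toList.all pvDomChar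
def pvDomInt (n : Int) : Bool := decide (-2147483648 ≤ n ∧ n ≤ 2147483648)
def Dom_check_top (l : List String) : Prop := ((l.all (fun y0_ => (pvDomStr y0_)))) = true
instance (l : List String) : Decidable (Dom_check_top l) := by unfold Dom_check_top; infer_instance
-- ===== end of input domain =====

-- B replaces A's full ascending scan with slicing by a descending early-exit search over
-- the feasible indices i ≤ len(l)//2, comparing rows element by element (objective: alternative).

-- ===== PORT A =====
-- A: for each i in range(len(l)), compare l[:i][::-1] with l[i:len(top)+i] and keep the max.
-- ([::-1] is ported as List.reverse, cf. PySem.List.slice?_none_none_neg_one)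
def check_top (l : List String) : Int :=
  (PySem.List.pyRange 0 (l.length : Int) 1).foldl
    (fun sym_max i =>
      let top := (PySem.List.slice l none (some i)).reverse
      let bottom := PySem.List.slice l (some i) (some ((top.length : Int) + i))
      if top = bottom then max sym_max i else sym_max) 0

-- ===== PORT B =====
-- the generator-expression test: all(l[i - 1 - k] == l[i + k] for k in range(i))
def checkTopMirror (l : List String) (i : Int) : Bool :=
  (PySem.List.pyRange 0 i 1).all
    (fun k => PySem.List.pyGetD l (i - 1 - k) "" == PySem.List.pyGetD l (i + k) "")

-- the while-loop: i counts down from len(l)//2, returning the first (largest) match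
def checkTopLoop (l : List String) : Nat → Int
  | 0 => 0
  | (i+1) => if checkTopMirror l ((i : Int) + 1) then ((i : Int) + 1) else checkTopLoop l i

def check_top_alt (l : List String) : Int := checkTopLoop l (l.length / 2)

-- ===== PRECONDITION & SPEC =====
def Spec_check_top (l : List String) (out : Int) : Prop := out = check_top_alt l
instance (l : List String) (out : Int) : Decidable (Spec_check_top l out) := by unfold Spec_check_top; infer_instance

-- ===== CLAIM (what is proved, stated in full; the proofs are below) =====
def Claim_equal_check_top : Prop := ∀ (l : List String), Dom_check_top l → Spec_check_top l (check_top l)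

-- ===== LEMMAS AND PROOFS =====

-- A's slice condition at index j, as a Bool on Nat
def condA (l : List String) (j : Nat) : Bool :=
  decide ((l.take j).reverse = (l.drop j).take j)

-- B's elementwise condition at index j, as a Bool on Nat
def condB (l : List String) (j : Nat) : Bool :=
  (List.range j).all (fun k => l.getD (j - 1 - k) "" == l.getD (j + k) "")

theorem mirror_eq (l : List String) (i : Nat) :
    checkTopMirror l (i : Int) = condB l i := by
  rw [Bool.eq_iff_iff]
  unfold checkTopMirror condB
  rw [PySem.List.pyRange_zero_nat, List.all_map]
  simp only [Function.comp, List.all_eq_true, List.mem_range, beq_iff_eq]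
  refine forall_congr' fun k => imp_congr_right fun hk => ?_
  have h1 : ((i : Int) - 1 - (k : Int)) = ((i - 1 - k : Nat) : Int) := by omega
  have h2 : ((i : Int) + (k : Int)) = ((i + k : Nat) : Int) := by omega
  rw [h1, h2, PySem.List.pyGetD_natCast, PySem.List.pyGetD_natCast]

theorem loop_eq_findGreatest (l : List String) (j : Nat) :
    checkTopLoop l j = ((Nat.findGreatest (fun i => condB l i = true) j : Nat) : Int) := by
  induction j with
  | zero => simp [checkTopLoop, Nat.findGreatest_zero]
  | succ m ih =>
    have hm : ((m : Int) + 1) = ((m + 1 : Nat) : Int) := by push_cast; ring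
    rw [checkTopLoop, hm, mirror_eq, Nat.findGreatest_succ]
    by_cases h : condB l (m + 1) = true
    · simp [h]
    · simp [h, ih]

theorem condA_iff (l : List String) (j : Nat) (hj : j ≤ l.length) :
    condA l j = true ↔ (2 * j ≤ l.length ∧ condB l j = true) := by
  unfold condA condB
  simp only [decide_eq_true_eq, List.all_eq_true, List.mem_range, beq_iff_eq]
  constructor
  · intro h
    have hlen := congrArg List.length h
    simp only [List.length_reverse, List.length_take, List.length_drop] at hlen
    have h2j : 2 * j ≤ l.length := by omega
    refine ⟨h2j, fun k hk => ?_⟩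
    have hk1 : j - 1 - k < l.length := by omega
    have hk2 : j + k < l.length := by omega
    rw [List.getD_eq_getElem l _ hk1, List.getD_eq_getElem l _ hk2]
    have hkr : k < (l.take j).reverse.length := by
      simp [List.length_take]; omega
    have := List.getElem_of_eq h hkr
    rw [List.getElem_reverse] at this
    rw [List.getElem_take, List.getElem_take] at this
    rw [List.getElem_drop] at this
    simp only [List.length_take] at this
    convert this using 2 <;> omega
  · rintro ⟨h2j, h⟩
    apply List.ext_getElem
    · simp only [List.length_reverse, List.length_take, List.length_drop]; omega
    · intro k hk1 hk2
      rw [List.getElem_reverse, List.getElem_take, List.getElem_take, List.getElem_drop]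
      simp only [List.length_reverse, List.length_take] at hk1 ⊢
      have hkj : k < j := by omega
      have h' := h k hkj
      have ha : j - 1 - k < l.length := by omega
      have hb : j + k < l.length := by omega
      rw [List.getD_eq_getElem l _ ha, List.getD_eq_getElem l _ hb] at h'
      convert h' using 2 <;> omega

theorem step_eq (l : List String) (s : Int) (j : Nat) (hj : j < l.length) :
    (if (PySem.List.slice l none (some (j : Int))).reverse =
        PySem.List.slice l (some (j : Int))
          (some (((PySem.List.slice l none (some (j : Int))).reverse.length : Int) + (j : Int)))
     then max s (j : Int) else s)
    = if condA l j then max s (j : Int) else s := by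
  simp only [PySem.List.slice_to_natCast]
  have hlen : ((l.take j).reverse.length : Int) + (j : Int) = ((j + j : Nat) : Int) := by
    simp only [List.length_reverse, List.length_take]
    push_cast; omega
  rw [hlen, PySem.List.slice_natCast]
  have : j + j - j = j := by omega
  rw [this]
  unfold condA
  by_cases h : (l.take j).reverse = (l.drop j).take j <;> simp [h]

theorem foldA_eq_findGreatest (l : List String) (b : Nat) (hb : b ≤ l.length) :
    (PySem.List.pyRange 0 (b : Int) 1).foldl
      (fun sym_max i =>
        let top := (PySem.List.slice l none (some i)).reverse
        let bottom := PySem.List.slice l (some i) (some ((top.length : Int) + i))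
        if top = bottom then max sym_max i else sym_max) 0
    = ((Nat.findGreatest (fun i => condA l i = true) (b - 1) : Nat) : Int) := by
  induction b with
  | zero => simp [PySem.List.pyRange_one_eq_nil]
  | succ m ih =>
    have hm : (0 : Int) ≤ (m : Int) := by positivity
    have hcast : ((m : Nat) : Int) + 1 = (((m + 1 : Nat) : Nat) : Int) := by push_cast; ring
    rw [← hcast, PySem.List.pyRange_one_succ_right hm, List.foldl_append]
    rw [ih (by omega), List.foldl_cons, List.foldl_nil]
    simp only [step_eq l _ m (by omega)]
    rcases Nat.eq_zero_or_pos m with hm0 | hm0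
    · subst hm0
      by_cases h : condA l 0 = true <;> simp [h, Nat.findGreatest_zero]
    · obtain ⟨p, rfl⟩ : ∃ p, m = p + 1 := ⟨m - 1, by omega⟩
      have e1 : p + 1 - 1 = p := rfl
      have e2 : p + 1 + 1 - 1 = p + 1 := rfl
      rw [e1, e2, Nat.findGreatest_succ]
      by_cases h : condA l (p + 1) = true
      · simp only [h, if_true]
        have hle : Nat.findGreatest (fun i => condA l i = true) p ≤ p + 1 := by
          have := Nat.findGreatest_le (P := fun i => condA l i = true) p
          omega
        rw [max_eq_right (by exact_mod_cast hle)]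
      · simp [h]

theorem findGreatest_drop (P : Nat → Prop) [DecidablePred P] (m m' : Nat)
    (hle : m' ≤ m) (hP : ∀ i, i ≤ m → P i → i ≤ m') :
    Nat.findGreatest P m = Nat.findGreatest P m' := by
  induction m with
  | zero => have h0 : m' = 0 := by omega
            rw [h0]
  | succ k ih =>
    rcases Nat.eq_or_lt_of_le hle with h | h
    · rw [h]
    · have hnk : ¬ P (k + 1) := fun hp => by have := hP (k + 1) le_rfl hp; omega
      rw [Nat.findGreatest_succ, if_neg hnk]
      exact ih (by omega) (fun i hi hp => hP i (by omega) hp)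

theorem findGreatest_congr (P Q : Nat → Prop) [DecidablePred P] [DecidablePred Q] (m : Nat)
    (h : ∀ i, i ≤ m → (P i ↔ Q i)) :
    Nat.findGreatest P m = Nat.findGreatest Q m := by
  induction m with
  | zero => rfl
  | succ k ih =>
    rw [Nat.findGreatest_succ, Nat.findGreatest_succ]
    by_cases hp : P (k + 1)
    · rw [if_pos hp, if_pos ((h (k + 1) le_rfl).mp hp)]
    · rw [if_neg hp, if_neg (fun hq => hp ((h (k + 1) le_rfl).mpr hq))]
      exact ih (fun i hi => h i (by omega))

-- ===== VERDICT (by name: the statement is the Claim_ definition above) =====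
theorem check_top_spec : Claim_equal_check_top := by
  intro l _
  unfold Spec_check_top check_top check_top_alt
  rw [foldA_eq_findGreatest l l.length le_rfl, loop_eq_findGreatest]
  congr 1
  rcases Nat.eq_zero_or_pos l.length with h0 | h0
  · simp [h0, Nat.findGreatest_zero]
  · have h1 : Nat.findGreatest (fun i => condA l i = true) (l.length - 1)
        = Nat.findGreatest (fun i => condA l i = true) (l.length / 2) := by
      apply findGreatest_drop
      · omega
      · intro i hi hp
        have := (condA_iff l i (by omega)).mp hp
        omega
    rw [h1]
    apply findGreatest_congr
    intro i hi
    have h2 : 2 * i ≤ l.length := by omega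
    rw [condA_iff l i (by omega)]
    tauto
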